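-- pv_equiv track=rewrite | github.com/xavierfav/music-pattern-discovery | sequenceParser.py | sum_length_sequence
-- ===== SOURCE A (Python) =====
-- def sum_length_sequence(sequence, length_sequence_maximum, truncate=False):
--     """
--     Summation length of a sequence
--     :param sequence:
--     :param truncate: if True, truncate the last note length to duration 2
--     :return:
--     """
--
--     sum_len_sequence = 0
--
--     for note in sequence[:-1]:
--         sum_len_sequence += int(note[1])
--
--     # when sum_len_sequence is <= length_sequence_maximum, we don't need truncation
--     if sum_len_sequence + int(sequence[-1][1]) <= length_sequence_maximum:
--         sum_len_sequence += int(sequence[-1][1])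
--     else:
--         if not truncate:
--             sum_len_sequence += int(sequence[-1][1])
--         else:
--             sum_len_sequence += 2
--
--     return sum_len_sequence
-- ===== SOURCE B (Python) =====
-- def sum_length_sequence(sequence, length_sequence_maximum, truncate=False):
--     # Divide-and-conquer summation over index ranges instead of A's linear
--     # loop over the slice sequence[:-1].
--     def total(lo, hi):
--         if hi <= lo:
--             return 0
--         if hi == lo + 1:
--             return int(sequence[lo][1])
--         mid = (lo + hi) // 2
--         return total(lo, mid) + total(mid, hi)
--
--     last = int(sequence[-1][1])
--     s = total(0, len(sequence) - 1)
--     if s + last <= length_sequence_maximum or not truncate: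
--         return s + last
--     return s + 2
-- ===== Notes on version B (the rewrite author's own statement) =====
-- stated objective: alternative
-- what changed: B computes the sum of all but the last note by divide-and-conquer recursion on index ranges (splitting at the midpoint) instead of A's linear loop over the slice sequence[:-1], and collapses A's three-way branch into one disjunctive guard.
import Mathlib
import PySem

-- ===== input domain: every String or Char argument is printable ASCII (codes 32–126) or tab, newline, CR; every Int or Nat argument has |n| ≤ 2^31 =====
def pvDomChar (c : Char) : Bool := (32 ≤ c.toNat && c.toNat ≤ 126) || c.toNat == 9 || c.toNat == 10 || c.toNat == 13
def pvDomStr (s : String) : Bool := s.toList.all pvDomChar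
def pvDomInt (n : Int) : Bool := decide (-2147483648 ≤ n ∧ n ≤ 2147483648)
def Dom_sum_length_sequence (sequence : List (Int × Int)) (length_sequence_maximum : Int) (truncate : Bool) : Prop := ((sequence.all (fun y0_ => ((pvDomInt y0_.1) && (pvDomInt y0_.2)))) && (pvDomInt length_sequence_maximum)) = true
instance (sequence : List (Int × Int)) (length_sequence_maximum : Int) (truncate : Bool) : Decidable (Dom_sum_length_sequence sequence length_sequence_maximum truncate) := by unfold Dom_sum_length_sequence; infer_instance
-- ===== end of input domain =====

-- B sums all but the last note by divide-and-conquer recursion on index ranges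
-- instead of A's linear loop over sequence[:-1], and merges A's three-way
-- branch into one disjunctive guard; same O(n) cost, different traversal.


-- ===== PORT A =====
-- loop over sequence[:-1], then three-way branch on sequence[-1]
def sum_length_sequence (sequence : List (Int × Int)) (length_sequence_maximum : Int) (truncate : Bool) : Int :=
  let sum_len := (PySem.List.slice sequence none (some (-1))).foldl (fun acc note => acc + note.2) 0
  if sum_len + (PySem.List.pyGetD sequence (-1) (0, 0)).2 ≤ length_sequence_maximum then
    sum_len + (PySem.List.pyGetD sequence (-1) (0, 0)).2
  else if !truncate then
    sum_len + (PySem.List.pyGetD sequence (-1) (0, 0)).2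
  else
    sum_len + 2

-- ===== PORT B =====
-- divide-and-conquer sum of sequence[lo:hi] second components
def pvTotalB (sequence : List (Int × Int)) (lo hi : Nat) : Int :=
  if hi ≤ lo then 0
  else if hi = lo + 1 then (PySem.List.pyGetD sequence (lo : Int) (0, 0)).2
  else
    pvTotalB sequence lo ((lo + hi) / 2) + pvTotalB sequence ((lo + hi) / 2) hi
termination_by hi - lo
decreasing_by all_goals omega

def sum_length_sequence_alt (sequence : List (Int × Int)) (length_sequence_maximum : Int) (truncate : Bool) : Int :=
  let last := (PySem.List.pyGetD sequence (-1) (0, 0)).2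
  let s := pvTotalB sequence 0 (sequence.length - 1)
  if s + last ≤ length_sequence_maximum ∨ truncate = false then s + last else s + 2

-- ===== PRECONDITION & SPEC =====
-- Pre_ excludes the empty sequence, on which A (and B) raise IndexError at sequence[-1].
def Pre_sum_length_sequence (sequence : List (Int × Int)) (length_sequence_maximum : Int) (truncate : Bool) : Prop := sequence ≠ []
instance (sequence : List (Int × Int)) (length_sequence_maximum : Int) (truncate : Bool) : Decidable (Pre_sum_length_sequence sequence length_sequence_maximum truncate) := by unfold Pre_sum_length_sequence; infer_instance
def pvWitness_sum_length_sequence : (List (Int × Int)) × Int × Bool := ([(1, 3), (2, 4)], 5, true)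

def Spec_sum_length_sequence (sequence : List (Int × Int)) (length_sequence_maximum : Int) (truncate : Bool) (out : Int) : Prop := out = sum_length_sequence_alt sequence length_sequence_maximum truncate
instance (sequence : List (Int × Int)) (length_sequence_maximum : Int) (truncate : Bool) (out : Int) : Decidable (Spec_sum_length_sequence sequence length_sequence_maximum truncate out) := by unfold Spec_sum_length_sequence; infer_instance

-- ===== CLAIM =====
def Claim_equal_sum_length_sequence : Prop := ∀ (sequence : List (Int × Int)) (length_sequence_maximum : Int) (truncate : Bool), Dom_sum_length_sequence sequence length_sequence_maximum truncate → Pre_sum_length_sequence sequence length_sequence_maximum truncate → Spec_sum_length_sequence sequence length_sequence_maximum truncate (sum_length_sequence sequence length_sequence_maximum truncate)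

-- ===== LEMMAS AND PROOFS =====

theorem foldl_snd_eq_sum_map (ys : List (Int × Int)) (a : Int) :
    ys.foldl (fun acc note => acc + note.2) a = a + (ys.map Prod.snd).sum := by
  induction ys generalizing a with
  | nil => simp
  | cons y ys ih => simp [List.foldl_cons, ih (a + y.2)]; ring

-- pvTotalB computes the sum of second components over the index range [lo, hi)
theorem pvTotalB_eq_sum (sequence : List (Int × Int)) (lo hi : Nat) (hhi : hi ≤ sequence.length) :
    pvTotalB sequence lo hi = (((sequence.map Prod.snd).drop lo).take (hi - lo)).sum := by
  by_cases hle : hi ≤ lo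
  · rw [pvTotalB]
    simp [hle, Nat.sub_eq_zero_of_le hle]
  · by_cases hone : hi = lo + 1
    · rw [pvTotalB]
      have hlt : lo < sequence.length := by omega
      have hlt' : lo < (sequence.map Prod.snd).length := by simpa using hlt
      simp only [hone, if_true]
      rw [PySem.List.pyGetD_natCast]
      rw [List.drop_eq_getElem_cons hlt']
      simp only [Nat.add_sub_cancel_left, List.take_succ_cons, List.take_zero,
        List.sum_cons, List.sum_nil, add_zero]
      simp [hlt]
    · rw [pvTotalB]
      simp only [hle, if_false, hone, if_false]
      have h1 : (lo + hi) / 2 ≤ sequence.length := by omega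
      rw [pvTotalB_eq_sum sequence lo ((lo + hi) / 2) h1,
          pvTotalB_eq_sum sequence ((lo + hi) / 2) hi hhi]
      have hmid1 : lo < (lo + hi) / 2 := by omega
      have hmid2 : (lo + hi) / 2 < hi := by omega
      have hsplit : hi - lo = ((lo + hi) / 2 - lo) + (hi - (lo + hi) / 2) := by omega
      rw [hsplit, List.take_add, List.sum_append, List.drop_drop]
      have : lo + ((lo + hi) / 2 - lo) = (lo + hi) / 2 := by omega
      rw [this]
termination_by hi - lo
decreasing_by all_goals omega

theorem pvTotalB_eq_dropLast (sequence : List (Int × Int)) :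
    pvTotalB sequence 0 (sequence.length - 1) = ((sequence.dropLast).map Prod.snd).sum := by
  rw [pvTotalB_eq_sum sequence 0 (sequence.length - 1) (by omega)]
  rw [List.map_dropLast, List.dropLast_eq_take]
  simp

-- ===== VERDICT =====
theorem sum_length_sequence_spec : Claim_equal_sum_length_sequence := by
  intro sequence m t _ _
  unfold Spec_sum_length_sequence sum_length_sequence sum_length_sequence_alt
  rw [PySem.List.slice_to_neg_one, foldl_snd_eq_sum_map, pvTotalB_eq_dropLast]
  generalize (PySem.List.pyGetD sequence (-1) (0, 0)).2 = L
  generalize ((List.map Prod.snd sequence).dropLast).sum = S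
  rcases t with _ | _ <;>
    simp only [Bool.not_false, Bool.not_true, Bool.false_eq_true, Bool.true_eq_false, or_true, or_false, if_true, if_false] <;>
    split_ifs <;> omega
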